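-- pv_equiv track=rewrite | github.com/kuznetsovvj/education | algorithms/codeforces/1846c.py | check
-- ===== SOURCE A (Python) =====
-- def check(pls, time):
--     res = [r(pl, time) for pl in pls]
--     if len(res) == 1:
--         return 1
--     ans = 1
--     for item in res[1:]:
--         if item[1] > res[0][1] or (item[1] == res[0][1] and item[0] < res[0][0]):
--             ans += 1
--     return ans
--
-- def r(pl, time):
--     pl.sort()
--     i = 0
--     c_time, c_penalty = 0, 0
--     while i < len(pl) and c_time <= time:
--         if c_time + pl[i] <= time:
--             c_time += pl[i]
--             c_penalty += c_time
--             i += 1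
--         else:
--             break
--     return (c_penalty, i)
-- ===== SOURCE B (Python) =====
-- def r(pl, time):
--     pl.sort()
--     pref = []
--     s = 0
--     for x in pl:
--         s += x
--         pref.append(s)
--     lo, hi = 0, len(pref)
--     while lo < hi:
--         mid = (lo + hi) // 2
--         if pref[mid] <= time:
--             lo = mid + 1
--         else:
--             hi = mid
--     # penalty of solving the lo cheapest problems back to back:
--     # problem j (0-based) is counted in every later finish time, i.e. (lo - j) times
--     penalty = sum((lo - j) * pl[j] for j in range(lo))
--     return (penalty, lo)
--
-- def check(pls, time):
--     if not pls:
--         return 1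
--     keys = [r(pl, time) for pl in pls]
--     p0, c0 = keys[0]
--     return 1 + sum(1 for pen, cnt in keys[1:] if (cnt, -pen) > (c0, -p0))
-- ===== Notes on version B (the rewrite author's own statement) =====
-- stated objective: alternative
-- what changed: Helper r no longer runs A's greedy while-loop with running time/penalty counters: it binary-searches the prefix-sum list for the cut index i and computes the penalty by the closed-form weighted sum of (i-j)*pl[j]; check counts teams whose rank key (cnt,-pen) beats the first team's key.
-- outside the precondition, e.g. on check([[1], [-5]], -1): A returns 1, B returns 2
import Mathlib
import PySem

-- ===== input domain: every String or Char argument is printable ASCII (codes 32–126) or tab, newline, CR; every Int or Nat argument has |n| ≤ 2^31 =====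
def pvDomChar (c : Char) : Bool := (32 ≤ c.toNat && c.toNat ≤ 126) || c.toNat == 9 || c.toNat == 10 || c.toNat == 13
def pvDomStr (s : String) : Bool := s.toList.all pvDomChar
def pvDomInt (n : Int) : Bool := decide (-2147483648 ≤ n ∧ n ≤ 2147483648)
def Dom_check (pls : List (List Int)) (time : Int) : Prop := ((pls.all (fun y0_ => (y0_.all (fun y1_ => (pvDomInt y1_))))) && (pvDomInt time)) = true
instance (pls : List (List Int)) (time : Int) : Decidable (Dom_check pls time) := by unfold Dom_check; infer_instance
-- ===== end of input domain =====

-- B replaces A's greedy while-loop helper r by: prefix sums + binary search for the cut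
-- index + a closed-form weighted penalty sum; equivalence is about return values only
-- (both Pythons sort each pl in place).

-- ===== PORT A =====
-- the while loop of r: state (c_time, c_penalty, i) over the sorted list
def checkALoop (time : Int) : List Int → Int → Int → Int → Int × Int
  | [], _, c_penalty, i => (c_penalty, i)
  | x :: rest, c_time, c_penalty, i =>
    if c_time ≤ time then
      if c_time + x ≤ time then
        checkALoop time rest (c_time + x) (c_penalty + (c_time + x)) (i + 1)
      else (c_penalty, i)
    else (c_penalty, i)

def checkAR (pl : List Int) (time : Int) : Int × Int :=
  checkALoop time (PySem.List.sorted pl (fun x => x) false) 0 0 0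

def check (pls : List (List Int)) (time : Int) : Int :=
  let res := pls.map (fun pl => checkAR pl time)
  if res.length = 1 then 1
  else
    match res with
    | [] => 1  -- the Python loop over res[1:] = [] never touches res[0]; A returns ans = 1
    | r0 :: rest =>
      rest.foldl (fun ans item =>
        if item.2 > r0.2 ∨ (item.2 = r0.2 ∧ item.1 < r0.1) then ans + 1 else ans) 1

-- ===== PORT B =====
-- 'for x in pl: s += x; pref.append(s)' — the running-sum loop building the prefix list
def checkBPrefix (s : Int) : List Int → List Int
  | [] => []
  | x :: xs => (s + x) :: checkBPrefix (s + x) xs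

-- the 'while lo < hi' binary search; fuel = pref.length bounds its iteration count
-- (pref[mid] is always in range when 0 ≤ lo < hi ≤ len, so .getD 0 is exact there)
def checkBSearch (pref : List Int) (time : Int) : Int → Int → Nat → Int
  | lo, _, 0 => lo
  | lo, hi, fuel + 1 =>
    if lo < hi then
      let mid := PySem.Int.floordiv (lo + hi) 2
      if (PySem.List.pyGet? pref mid).getD 0 ≤ time then
        checkBSearch pref time (mid + 1) hi fuel
      else
        checkBSearch pref time lo mid fuel
    else lo

def checkBR (pl : List Int) (time : Int) : Int × Int :=
  let l := PySem.List.sorted pl (fun x => x) false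
  let pref := checkBPrefix 0 l
  let lo := checkBSearch pref time 0 (pref.length : Int) pref.length
  -- sum((lo - j) * pl[j] for j in range(lo)); j is always in range, so .getD 0 is exact
  let penalty := ((PySem.List.pyRange 0 lo 1).map
      (fun j => (lo - j) * (PySem.List.pyGet? l j).getD 0)).sum
  (penalty, lo)

def check_alt (pls : List (List Int)) (time : Int) : Int :=
  if pls = [] then 1
  else
    let keys := pls.map (fun pl => checkBR pl time)
    let k0 := (PySem.List.pyGet? keys 0).getD (0, 0)
    -- '(cnt, -pen) > (c0, -p0)' is Python's lexicographic tuple compare, spelled out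
    1 + (((keys.drop 1).filter (fun k =>
        decide (k.2 > k0.2 ∨ (k.2 = k0.2 ∧ -k.1 > -k0.1)))).length : Int)

-- ===== PRECONDITION & SPEC =====
-- Pre_ excludes the corner where time is negative AND some problem duration is negative —
-- nonsense inputs for this contest-scoring function (durations are positive in the source
-- problem), on which the fitting-prefix predicate B's binary search needs is not monotone:
-- A makes every team solve nothing there while B's bisect lands on an arbitrary cut.
def Pre_check (pls : List (List Int)) (time : Int) : Prop :=
  0 ≤ time ∨ ∀ pl ∈ pls, ∀ x ∈ pl, 0 ≤ x
instance (pls : List (List Int)) (time : Int) : Decidable (Pre_check pls time) := by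
  unfold Pre_check; infer_instance

def pvWitness_check : List (List Int) × Int := ([[2, 1], [1, 1, 1]], 3)

def Spec_check (pls : List (List Int)) (time : Int) (out : Int) : Prop := out = check_alt pls time
instance (pls : List (List Int)) (time : Int) (out : Int) : Decidable (Spec_check pls time out) := by unfold Spec_check; infer_instance

-- ===== CLAIM (what is proved, stated in full; the proofs are below) =====
def Claim_equal_check : Prop := ∀ (pls : List (List Int)) (time : Int), Dom_check pls time → Pre_check pls time → Spec_check pls time (check pls time)

-- ===== LEMMAS AND PROOFS =====

theorem checkBPrefix_length (c : Int) (l : List Int) :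
    (checkBPrefix c l).length = l.length := by
  induction l generalizing c with
  | nil => rfl
  | cons x xs ih => simp [checkBPrefix, ih]

-- once a prefix sum exceeds time, nonnegative further elements keep every later prefix above time
theorem checkB_filter_nil (time c : Int) (xs : List Int)
    (hx : ∀ y ∈ xs, 0 ≤ y) (hc : time < c) :
    (checkBPrefix c xs).filter (fun s => decide (s ≤ time)) = [] := by
  induction xs generalizing c with
  | nil => rfl
  | cons y ys ih =>
    have hy : 0 ≤ y := hx y (List.mem_cons_self)
    simp only [checkBPrefix, List.filter_cons]
    rw [if_neg (by simp; omega)]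
    exact ih (c + y) (fun z hz => hx z (List.mem_cons_of_mem _ hz)) (by omega)

-- A's while loop on a sorted suffix computes the sum/length of the fitting prefixes
theorem checkALoop_eq (time : Int) (l : List Int) (hl : l.Pairwise (· ≤ ·)) :
    ∀ c pen i, c ≤ time →
      checkALoop time l c pen i =
        (pen + ((checkBPrefix c l).filter (fun s => decide (s ≤ time))).sum,
         i + (((checkBPrefix c l).filter (fun s => decide (s ≤ time))).length : Int)) := by
  induction l with
  | nil => intro c pen i hc; simp [checkALoop, checkBPrefix]
  | cons x xs ih =>
    intro c pen i hc
    have hpw := List.pairwise_cons.mp hl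
    by_cases hx : c + x ≤ time
    · simp only [checkALoop, if_pos hc, if_pos hx, checkBPrefix, List.filter_cons]
      rw [if_pos (by simpa using hx)]
      rw [ih hpw.2 (c + x) (pen + (c + x)) (i + 1) hx]
      simp; constructor <;> ring
    · have hlt : time < c + x := by omega
      simp only [checkALoop, if_pos hc, if_neg hx, checkBPrefix, List.filter_cons]
      rw [if_neg (by simpa using hlt)]
      rw [checkB_filter_nil time (c + x) xs (fun y hy => by have := hpw.1 y hy; omega) hlt]
      simp

-- on admitted inputs the fitting prefixes form an initial segment: filter = takeWhile
theorem checkB_filter_eq_takeWhile (time : Int) (l : List Int) (hl : l.Pairwise (· ≤ ·)) :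
    ∀ c, (c ≤ time ∨ (time < c ∧ ∀ x ∈ l, 0 ≤ x)) →
      (checkBPrefix c l).filter (fun s => decide (s ≤ time)) =
      (checkBPrefix c l).takeWhile (fun s => decide (s ≤ time)) := by
  induction l with
  | nil => intro c _; rfl
  | cons x xs ih =>
    intro c hc
    have hpw := List.pairwise_cons.mp hl
    by_cases hx : c + x ≤ time
    · simp only [checkBPrefix, List.filter_cons, List.takeWhile_cons]
      rw [if_pos (by simpa using hx), if_pos (by simpa using hx)]
      rw [ih hpw.2 (c + x) (Or.inl hx)]
    · have hlt : time < c + x := by omega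
      simp only [checkBPrefix, List.filter_cons, List.takeWhile_cons]
      rw [if_neg (by simpa using hlt), if_neg (by simpa using hlt)]
      have hnn : ∀ y ∈ xs, 0 ≤ y := by
        rcases hc with hc | hc
        · intro y hy; have := hpw.1 y hy; omega
        · intro y hy; exact hc.2 y (List.mem_cons_of_mem _ hy)
      exact checkB_filter_nil time (c + x) xs hnn hlt

-- index characterisation: element k fits iff k is below the takeWhile length
theorem takeWhile_index_iff {α : Type} (p : α → Bool) (L : List α)
    (hft : L.filter p = L.takeWhile p) (k : Nat) (hk : k < L.length) :
    (p L[k] = true ↔ k < (L.takeWhile p).length) := by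
  have hpre : L.takeWhile p <+: L := List.takeWhile_prefix p
  obtain ⟨t, ht⟩ := hpre
  set b := (L.takeWhile p).length with hb
  constructor
  · intro hp
    by_contra hkb
    rw [Nat.not_lt] at hkb
    -- L[k] lies in t, but countP says t has no p-elements
    have hcount : L.countP p = b := by
      rw [List.countP_eq_length_filter, hft]
    have hct : t.countP p = 0 := by
      have := congrArg (List.countP p) ht.symm
      rw [List.countP_append] at this
      have htw : (L.takeWhile p).countP p = b := by
        rw [List.countP_eq_length_filter, List.filter_eq_self.mpr (fun a ha => List.mem_takeWhile_imp ha)]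
      omega
    have hmem : L[k] ∈ t := by
      have hk' : k < (L.takeWhile p ++ t).length := by rw [ht]; exact hk
      have heq : L[k] = (L.takeWhile p ++ t)[k]'hk' := List.getElem_of_eq ht.symm hk
      rw [heq, List.getElem_append_right (by omega)]
      exact List.getElem_mem _
    have := List.countP_eq_zero.mp hct _ hmem
    simp [hp] at this
  · intro hkb
    have hk' : k < (L.takeWhile p ++ t).length := by rw [ht]; exact hk
    have heq : L[k] = (L.takeWhile p ++ t)[k]'hk' := List.getElem_of_eq ht.symm hk
    rw [heq, List.getElem_append_left (by omega)]
    exact List.mem_takeWhile_imp (List.getElem_mem _)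

-- the ported binary search finds the boundary of any initial-segment predicate
theorem checkBSearch_eq (pref : List Int) (time : Int) (b : Nat)
    (_hb : b ≤ pref.length)
    (hiff : ∀ k (hk : k < pref.length), (pref[k] ≤ time ↔ k < b)) :
    ∀ (fuel : Nat) (lo hi : Int), 0 ≤ lo → lo ≤ (b : Int) → (b : Int) ≤ hi →
      hi ≤ (pref.length : Int) → hi - lo ≤ (fuel : Int) →
      checkBSearch pref time lo hi fuel = b := by
  intro fuel
  induction fuel with
  | zero => intro lo hi h0 hlb hbh hhl hf; simp only [checkBSearch]; omega
  | succ n ih =>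
    intro lo hi h0 hlb hbh hhl hf
    simp only [checkBSearch]
    by_cases hlh : lo < hi
    · rw [if_pos hlh]
      have hmid := PySem.Int.floordiv_two_mid_bounds (le_of_lt hlh)
      set mid := PySem.Int.floordiv (lo + hi) 2 with hm
      have hmlt : mid < hi := by
        rw [hm, PySem.Int.floordiv_eq_ediv_of_pos (by omega)]; omega
      have hmge : lo ≤ mid := hmid.1
      have hmrange : 0 ≤ mid ∧ mid < (pref.length : Int) := by omega
      have hget : PySem.List.pyGet? pref mid = some (pref[mid.toNat]'(by omega)) :=
        PySem.List.pyGet?_eq_some_getElem pref hmrange.1 hmrange.2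
      rw [hget]
      have hiffm := hiff mid.toNat (by omega)
      by_cases hfit : pref[mid.toNat]'(by omega) ≤ time
      · rw [if_pos (by simpa using hfit)]
        have : mid.toNat < b := hiffm.mp hfit
        exact ih (mid + 1) hi (by omega) (by omega) hbh hhl (by push_cast at hf ⊢; omega)
      · rw [if_neg (by simpa using hfit)]
        have : ¬ mid.toNat < b := fun h => hfit (hiffm.mpr h)
        exact ih lo mid h0 hlb (by omega) (by omega) (by push_cast at hf ⊢; omega)
    · rw [if_neg hlh]; omega

-- prefix sums only look at the first b elements
theorem checkBPrefix_take (c : Int) (l : List Int) (b : Nat) :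
    (checkBPrefix c l).take b = checkBPrefix c (l.take b) := by
  induction l generalizing c b with
  | nil => simp [checkBPrefix]
  | cons x xs ih =>
    cases b with
    | zero => simp [checkBPrefix]
    | succ n => simp [checkBPrefix, ih]

-- closed form: the sum of the prefix sums of m (from c) is the weighted element sum
theorem checkBPrefix_sum_weighted (m : List Int) :
    ∀ c, (checkBPrefix c m).sum =
      ((List.range m.length).map
        (fun (j : Nat) => ((m.length : Int) - (j : Int)) * m.getD j 0)).sum
      + (m.length : Int) * c := by
  induction m with
  | nil => intro c; simp [checkBPrefix]
  | cons x xs ih =>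
    intro c
    simp only [checkBPrefix, List.sum_cons, ih (c + x), List.length_cons]
    rw [List.range_succ_eq_map, List.map_cons, List.map_map, List.sum_cons]
    have hmap : List.map
        ((fun (j : Nat) => ((((xs.length + 1 : Nat)) : Int) - (j : Int)) * (x :: xs).getD j 0) ∘ Nat.succ)
        (List.range xs.length)
        = List.map (fun (j : Nat) => ((xs.length : Int) - (j : Int)) * xs.getD j 0) (List.range xs.length) := by
      apply List.map_congr_left
      intro j hj
      simp only [Function.comp, List.getD_cons_succ]
      push_cast; ring_nf
    rw [hmap]
    simp only [List.getD_cons_zero]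
    push_cast; ring

theorem pyWitness_ok : Dom_check pvWitness_check.1 pvWitness_check.2 ∧
    Pre_check pvWitness_check.1 pvWitness_check.2 := by decide

-- the two helpers agree on every admitted (pl, time)
theorem checkR_eq (pl : List Int) (time : Int)
    (h : 0 ≤ time ∨ ∀ x ∈ pl, 0 ≤ x) : checkAR pl time = checkBR pl time := by
  classical
  set l := PySem.List.sorted pl (fun x => x) false with hldef
  have hpw : l.Pairwise (· ≤ ·) := by
    simpa using PySem.List.sorted_pairwise pl (fun x => x)
  have hmem : ∀ x ∈ l, x ∈ pl := fun x hx =>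
    (PySem.List.mem_sorted pl (fun x => x) false x).mp hx
  set p : Int → Bool := fun s => decide (s ≤ time) with hp
  set pref := checkBPrefix 0 l with hprefdef
  -- the side condition for the initial-segment lemma
  have hcond : (0 : Int) ≤ time ∨ (time < 0 ∧ ∀ x ∈ l, 0 ≤ x) := by
    rcases h with h | h
    · exact Or.inl h
    · by_cases ht : 0 ≤ time
      · exact Or.inl ht
      · exact Or.inr ⟨by omega, fun x hx => h x (hmem x hx)⟩
  have hft : pref.filter p = pref.takeWhile p :=
    checkB_filter_eq_takeWhile time l hpw 0 hcond
  set b := (pref.takeWhile p).length with hbdef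
  have hble : b ≤ pref.length := by
    exact List.IsPrefix.length_le (List.takeWhile_prefix p)
  have hiff : ∀ k (hk : k < pref.length), (pref[k] ≤ time ↔ k < b) := by
    intro k hk
    have := takeWhile_index_iff p pref hft k hk
    simpa [hp] using this
  have hlen : pref.length = l.length := checkBPrefix_length 0 l
  -- the binary search returns b
  have hsearch : checkBSearch pref time 0 (pref.length : Int) pref.length = (b : Int) := by
    exact checkBSearch_eq pref time b hble hiff pref.length 0 (pref.length : Int)
      le_rfl (by exact_mod_cast Nat.zero_le b) (by exact_mod_cast hble) le_rfl (by omega)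
  -- A's loop result in terms of the filter
  have hfilter_sum_len :
      checkAR pl time = ((pref.filter p).sum, ((pref.filter p).length : Int)) := by
    rcases hcond with ht | ⟨ht, hnn⟩
    · unfold checkAR
      rw [checkALoop_eq time l hpw 0 0 0 ht]
      simp [hprefdef, hp, hldef]
    · have hnil : pref.filter p = [] := checkB_filter_nil time 0 l hnn ht
      rw [hnil]
      unfold checkAR
      rw [← hldef]
      cases hL : l with
      | nil => simp [checkALoop]
      | cons x xs => simp [checkALoop, if_neg (by omega : ¬ (0:Int) ≤ time)]
  -- filter length = b
  have hflen : (pref.filter p).length = b := by rw [hft]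
  -- the weighted sum equals the filter sum
  have htake : pref.takeWhile p = pref.take b := by
    have hpre : pref.takeWhile p <+: pref := List.takeWhile_prefix p
    exact List.prefix_iff_eq_take.mp hpre
  have hsum : (pref.filter p).sum =
      ((List.range b).map (fun (j : Nat) => ((b : Int) - (j : Int)) * (l.take b).getD j 0)).sum := by
    rw [hft, htake, hprefdef, checkBPrefix_take 0 l b]
    have := checkBPrefix_sum_weighted (l.take b) 0
    rw [this]
    have hlb : (l.take b).length = b := by
      rw [List.length_take]; omega
    simp [hlb]
  -- assemble B's value
  have hB : checkBR pl time =
      (((PySem.List.pyRange 0 (checkBSearch pref time 0 (pref.length : Int) pref.length) 1).map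
          (fun j => ((checkBSearch pref time 0 (pref.length : Int) pref.length) - j)
            * (PySem.List.pyGet? l j).getD 0)).sum,
        checkBSearch pref time 0 (pref.length : Int) pref.length) := rfl
  rw [hB, hsearch]
  rw [hfilter_sum_len, hflen]
  refine Prod.ext ?_ rfl
  simp only
  rw [hsum]
  -- rewrite B's pyRange/pyGet? expression into the range-map form
  rw [PySem.List.pyRange_zero_natCast, List.map_map]
  refine congrArg List.sum ?_
  apply List.map_congr_left
  intro j hj
  have hjb : j < b := List.mem_range.mp hj
  have hjl : j < l.length := by omega
  simp only [Function.comp]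
  rw [PySem.List.pyGet?_natCast, List.getElem?_eq_getElem hjl]
  have : (l.take b).getD j 0 = l[j] := by
    rw [List.getD_eq_getElem?_getD, List.getElem?_take_of_lt hjb, List.getElem?_eq_getElem hjl]
    rfl
  rw [this]
  rfl

-- ===== VERDICT (by name: the statement is the Claim_ definition above) =====
theorem check_spec : Claim_equal_check := by
  intro pls time _hdom hpre
  unfold Spec_check check check_alt
  have hmap : pls.map (fun pl => checkAR pl time) = pls.map (fun pl => checkBR pl time) := by
    apply List.map_congr_left
    intro pl hpl
    refine checkR_eq pl time ?_
    rcases hpre with h | h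
    · exact Or.inl h
    · exact Or.inr (h pl hpl)
  rw [hmap]
  cases pls with
  | nil => simp
  | cons p ps =>
    rw [if_neg (List.cons_ne_nil p ps)]
    simp only [List.map_cons, PySem.List.pyGet?_zero_cons, Option.getD_some,
      List.drop_succ_cons, List.drop_zero]
    by_cases hps : ps = []
    · subst hps; simp
    · have hlen : ¬ ((checkBR p time :: ps.map (fun pl => checkBR pl time)).length = 1) := by
        simp [hps]
      rw [if_neg hlen, PySem.List.foldl_ite_add_one, List.countP_eq_length_filter]
      have hfc : List.filter (fun x => decide (x.2 > (checkBR p time).2 ∨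
            x.2 = (checkBR p time).2 ∧ x.1 < (checkBR p time).1))
            (ps.map (fun pl => checkBR pl time))
          = List.filter (fun k => decide (k.2 > (checkBR p time).2 ∨
            k.2 = (checkBR p time).2 ∧ -k.1 > -(checkBR p time).1))
            (ps.map (fun pl => checkBR pl time)) := by
        apply List.filter_congr
        intro k _
        by_cases h1 : k.2 > (checkBR p time).2
        · simp [h1]
        · by_cases h2 : k.2 = (checkBR p time).2
          · simp [h2]
          · simp [h1, h2]
      rw [hfc]
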